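-- pv_equiv track=rewrite | github.com/AJ-Davis/veritas_logos | src/verification/annotation_engine.py | _find_line_position
-- ===== SOURCE A (Python) =====
-- from typing import Dict, List, Optional, Set, Tuple, Any, Union
--
-- def _find_line_position(line_number: int, document_text: str) -> Optional[Tuple[int, int, str]]:
--     """Find position of a specific line in the document."""
--     lines = document_text.split('\n')
--     if 0 <= line_number - 1 < len(lines):
--         line_text = lines[line_number - 1]
--
--         # Calculate position
--         start_pos = sum(len(line) + 1 for line in lines[:line_number - 1])  # +1 for newline
--         end_pos = start_pos + len(line_text)
--
--         return (start_pos, end_pos, line_text)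
--
--     return None
-- ===== SOURCE B (Python) =====
-- from typing import Optional, Tuple
--
-- def _find_line_position(line_number: int, document_text: str) -> Optional[Tuple[int, int, str]]:
--     """Find position of a specific line without splitting the document."""
--     if line_number < 1:
--         return None
--     start = 0
--     for _ in range(line_number - 1):
--         nl = document_text.find('\n', start)
--         if nl == -1:
--             return None
--         start = nl + 1
--     end = document_text.find('\n', start)
--     if end == -1:
--         end = len(document_text)
--     return (start, end, document_text[start:end])
-- ===== Notes on version B (the rewrite author's own statement) =====
-- stated objective: alternative
-- what changed: B never splits the document: it steps over line_number-1 newlines with str.find and slices out just the target line, instead of materialising every line and summing prefix lengths.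
import Mathlib
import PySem

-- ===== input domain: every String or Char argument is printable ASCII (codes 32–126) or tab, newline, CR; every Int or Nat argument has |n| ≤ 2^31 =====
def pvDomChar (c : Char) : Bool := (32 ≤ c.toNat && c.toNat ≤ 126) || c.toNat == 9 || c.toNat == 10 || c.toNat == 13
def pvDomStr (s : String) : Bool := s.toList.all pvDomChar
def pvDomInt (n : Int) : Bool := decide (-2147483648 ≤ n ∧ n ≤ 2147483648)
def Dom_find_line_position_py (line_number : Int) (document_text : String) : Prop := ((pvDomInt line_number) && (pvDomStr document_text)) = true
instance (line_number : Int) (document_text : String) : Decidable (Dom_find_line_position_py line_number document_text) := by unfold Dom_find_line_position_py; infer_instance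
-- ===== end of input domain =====

-- B replaces A's full split of the document by stepping over newlines with str.find and slicing
-- out only the requested line.

-- ===== PORT A =====
def find_line_position_py (line_number : Int) (document_text : String) : Option (Int × Int × String) :=
  let lines := PySem.Chars.splitOn document_text.toList ['\n']
  if 0 ≤ line_number - 1 ∧ line_number - 1 < (lines.length : Int) then
    let line_text := PySem.List.pyGetD lines (line_number - 1) []
    let start_pos := ((PySem.List.slice lines none (some (line_number - 1))).map
        (fun l => (l.length : Int) + 1)).sum
    let end_pos := start_pos + (line_text.length : Int)
    some (start_pos, end_pos, String.ofList line_text)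
  else none

-- ===== PORT B =====
-- helper for B: the `for _ in range(line_number - 1)` loop of Source B, stepping over newlines
def bLoop (s : List Char) : Nat → Int → Option Int
  | 0, start => some start
  | k+1, start =>
    let nl := PySem.Chars.findFrom s ['\n'] start none
    if nl = -1 then none else bLoop s k (nl + 1)

def find_line_position_py_alt (line_number : Int) (document_text : String) : Option (Int × Int × String) :=
  if line_number < 1 then none
  else
    match bLoop document_text.toList (line_number - 1).toNat 0 with
    | none => none
    | some start =>
      let e := PySem.Chars.findFrom document_text.toList ['\n'] start none
      let endPos : Int := if e = -1 then (document_text.toList.length : Int) else e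
      some (start, endPos,
        String.ofList (PySem.List.slice document_text.toList (some start) (some endPos)))

-- ===== PRECONDITION & SPEC =====
def Spec_find_line_position_py (line_number : Int) (document_text : String) (out : Option (Int × Int × String)) : Prop := out = find_line_position_py_alt line_number document_text
instance (line_number : Int) (document_text : String) (out : Option (Int × Int × String)) : Decidable (Spec_find_line_position_py line_number document_text out) := by unfold Spec_find_line_position_py; infer_instance

-- ===== CLAIM (what is proved, stated in full; the proofs are below) =====
def Claim_equal_find_line_position_py : Prop := ∀ (line_number : Int) (document_text : String), Dom_find_line_position_py line_number document_text → Spec_find_line_position_py line_number document_text (find_line_position_py line_number document_text)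

-- ===== LEMMAS AND PROOFS =====

/-- Structural model of Python's `document_text.split('\n')`. -/
def mySplit : List Char → List (List Char)
  | [] => [[]]
  | c :: t =>
    if c = '\n' then [] :: mySplit t
    else
      match mySplit t with
      | [] => [[c]]
      | h :: r => (c :: h) :: r

lemma mySplit_ne_nil (s : List Char) : mySplit s ≠ [] := by
  cases s with
  | nil => simp [mySplit]
  | cons c t =>
    simp only [mySplit]
    split
    · simp
    · split <;> simp

lemma splitOn_go_eq : ∀ (fuel : Nat) (l cur : List Char) (acc : List (List Char)), l.length < fuel →
    PySem.Chars.splitOn.go ['\n'] fuel l cur acc =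
      acc.reverse ++ (match mySplit l with
        | [] => [cur.reverse]
        | h :: r => (cur.reverse ++ h) :: r) := by
  intro fuel
  induction fuel with
  | zero => intro l cur acc h; omega
  | succ f ih =>
    intro l cur acc h
    cases l with
    | nil => simp [PySem.Chars.splitOn.go, mySplit]
    | cons c t =>
      rw [PySem.Chars.splitOn.go]
      by_cases hc : c = '\n'
      · subst hc
        have hpre : List.isPrefixOf ['\n'] ('\n' :: t) = true := by simp [List.isPrefixOf]
        simp only [hpre, if_pos]
        have hd : List.drop (['\n'] : List Char).length ('\n' :: t) = t := rfl
        rw [hd, ih t [] (List.reverse cur :: acc) (by simpa using Nat.lt_of_succ_lt_succ h)]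
        simp only [mySplit]
        obtain ⟨h', r', hr⟩ : ∃ h' r', mySplit t = h' :: r' := by
          cases e : mySplit t with
          | nil => exact absurd e (mySplit_ne_nil t)
          | cons a b => exact ⟨a, b, rfl⟩
        simp [hr]
      · have hpre : List.isPrefixOf ['\n'] (c :: t) = false := by
          simp [List.isPrefixOf]; exact fun hh => absurd hh.symm hc
        simp only [hpre, Bool.false_eq_true, if_neg, not_false_eq_true]
        rw [ih t (c :: cur) acc (by simpa using Nat.lt_of_succ_lt_succ h)]
        simp only [mySplit, if_neg hc]
        obtain ⟨h', r', hr⟩ : ∃ h' r', mySplit t = h' :: r' := by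
          cases e : mySplit t with
          | nil => exact absurd e (mySplit_ne_nil t)
          | cons a b => exact ⟨a, b, rfl⟩
        simp [hr]

lemma splitOn_eq (s : List Char) : PySem.Chars.splitOn s ['\n'] = mySplit s := by
  rw [PySem.Chars.splitOn, splitOn_go_eq (s.length + 1) s [] [] (by omega)]
  obtain ⟨h', r', hr⟩ : ∃ h' r', mySplit s = h' :: r' := by
    cases e : mySplit s with
    | nil => exact absurd e (mySplit_ne_nil s)
    | cons a b => exact ⟨a, b, rfl⟩
  simp [hr]

lemma find_cons_nl (t : List Char) : PySem.Chars.find ('\n' :: t) ['\n'] = 0 := by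
  have hpre : List.isPrefixOf ['\n'] ('\n' :: t) = true := by simp [List.isPrefixOf]
  rw [PySem.Chars.find, PySem.Chars.find.go]; simp [hpre]

lemma find_go_shift : ∀ (l : List Char) (k : Nat),
    PySem.Chars.find.go ['\n'] l k =
      if PySem.Chars.find l ['\n'] = -1 then -1 else (k : Int) + PySem.Chars.find l ['\n'] := by
  intro l
  induction l with
  | nil => intro k; simp [PySem.Chars.find, PySem.Chars.find.go]
  | cons c t ih =>
    intro k
    have h0 : -1 ≤ PySem.Chars.find t ['\n'] := PySem.Chars.neg_one_le_find t ['\n']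
    by_cases hc : c = '\n'
    · subst hc
      have hpre : List.isPrefixOf ['\n'] ('\n' :: t) = true := by simp [List.isPrefixOf]
      rw [PySem.Chars.find.go, find_cons_nl t]
      simp [hpre]
    · have hpre : List.isPrefixOf ['\n'] (c :: t) = false := by
        simp [List.isPrefixOf]; exact fun hh => absurd hh.symm hc
      have hfind : PySem.Chars.find (c :: t) ['\n'] =
          if PySem.Chars.find t ['\n'] = -1 then -1 else 1 + PySem.Chars.find t ['\n'] := by
        rw [PySem.Chars.find, PySem.Chars.find.go]
        simp only [hpre, Bool.false_eq_true, if_false]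
        rw [ih 1]; norm_num
      rw [PySem.Chars.find.go]
      simp only [hpre, Bool.false_eq_true, if_false]
      rw [ih (k+1), hfind]
      by_cases hm : PySem.Chars.find t ['\n'] = -1
      · simp [hm]
      · have hne : ¬ ((1:Int) + PySem.Chars.find t ['\n'] = -1) := by omega
        rw [if_neg hm, if_neg hm, if_neg hne]
        push_cast; ring

lemma find_cons_ne {c : Char} (hc : c ≠ '\n') (t : List Char) :
    PySem.Chars.find (c :: t) ['\n'] =
      if PySem.Chars.find t ['\n'] = -1 then -1 else 1 + PySem.Chars.find t ['\n'] := by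
  have hpre : List.isPrefixOf ['\n'] (c :: t) = false := by
    simp [List.isPrefixOf]; exact fun hh => absurd hh.symm hc
  rw [PySem.Chars.find, PySem.Chars.find.go]
  simp only [hpre, Bool.false_eq_true, if_false]
  rw [find_go_shift t 1]; norm_num

lemma find_nil' : PySem.Chars.find ([] : List Char) ['\n'] = -1 := by decide
lemma find_char_spec (s : List Char) :
    ∃ h r, mySplit s = h :: r ∧
      ((r = [] ∧ s = h ∧ PySem.Chars.find s ['\n'] = -1) ∨
       (∃ t, r = mySplit t ∧ s = h ++ '\n' :: t ∧
          PySem.Chars.find s ['\n'] = (h.length : Int))) := by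
  induction s with
  | nil => exact ⟨[], [], rfl, Or.inl ⟨rfl, rfl, find_nil'⟩⟩
  | cons c t ih =>
    by_cases hc : c = '\n'
    · subst hc
      obtain ⟨h', r', hr, _⟩ := ih
      refine ⟨[], mySplit t, by simp [mySplit], Or.inr ⟨t, rfl, rfl, ?_⟩⟩
      simpa using find_cons_nl t
    · have hfind := find_cons_ne hc t
      obtain ⟨h', r', hr, hcase⟩ := ih
      rcases hcase with ⟨hr0, hth, hf⟩ | ⟨u, hru, htu, hf⟩
      · refine ⟨c :: h', [], ?_, Or.inl ⟨rfl, by rw [← hth], ?_⟩⟩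
        · simp [mySplit, hc, hr, hr0]
        · rw [hfind, if_pos hf]
      · refine ⟨c :: h', r', ?_, Or.inr ⟨u, hru, by rw [htu]; rfl, ?_⟩⟩
        · simp [mySplit, hc, hr]
        · rw [hfind, if_neg (by rw [hf]; omega), hf]; simp; omega

def offN (L : List (List Char)) (n : Nat) : Nat := ((L.take n).map (fun l => l.length + 1)).sum

lemma found_succ_le {u : List Char} (h0 : 0 ≤ PySem.Chars.find u ['\n']) :
    (PySem.Chars.find u ['\n']).toNat + 1 ≤ u.length := by
  have hsp := (PySem.Chars.find_spec (s := u) (sub := ['\n']) h0).1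
  have hlen := hsp.length_le
  have hd : (u.drop (PySem.Chars.find u ['\n']).toNat).length = u.length - (PySem.Chars.find u ['\n']).toNat :=
    List.length_drop ..
  have hle : (PySem.Chars.find u ['\n']).toNat ≤ u.length := by
    have := PySem.Chars.find_le_length u ['\n']; omega
  simp at hsp
  rw [hd] at hlen
  simp at hlen
  omega

lemma bLoop_shift : ∀ (n : Nat) (s : List Char) (p : Nat), p ≤ s.length →
    bLoop s n (p : Int) = (bLoop (s.drop p) n 0).map (fun x => x + (p : Int)) := by
  intro n
  induction n with
  | zero => intro s p hp; simp [bLoop]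
  | succ n ih =>
    intro s p hp
    simp only [bLoop]
    rw [PySem.Chars.findFrom_natCast s ['\n'] p hp, PySem.Chars.findFrom_zero]
    by_cases hm : PySem.Chars.find (List.drop p s) ['\n'] = -1
    · simp [hm]
    · have hn1 := PySem.Chars.neg_one_le_find (List.drop p s) ['\n']
      have h0 : 0 ≤ PySem.Chars.find (List.drop p s) ['\n'] := by omega
      set j := PySem.Chars.find (List.drop p s) ['\n'] with hj
      have hjn : j = ((j.toNat : Nat) : Int) := by omega
      have hjle : j.toNat + 1 ≤ s.length - p := by
        have := found_succ_le (u := List.drop p s) h0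
        simp at this; omega
      rw [if_neg hm, if_neg hm]
      have e1 : (p : Int) + j + 1 = ((p + (j.toNat + 1) : Nat) : Int) := by push_cast; omega
      have e2 : j + 1 = (((j.toNat + 1 : Nat)) : Int) := by push_cast; omega
      rw [e1, e2, ih s (p + (j.toNat + 1)) (by omega), ih (List.drop p s) (j.toNat + 1) (by simp; omega)]
      rw [List.drop_drop]
      rw [if_neg (show ¬((p:Int) + j = -1) by omega)]
      cases bLoop (List.drop (p + (j.toNat + 1)) s) n 0
      · simp
      · simp; ring

lemma bLoop_main : ∀ (n : Nat) (s : List Char),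
    (n < (mySplit s).length →
       bLoop s n 0 = some ((offN (mySplit s) n : Nat) : Int) ∧
       offN (mySplit s) n ≤ s.length ∧
       mySplit (s.drop (offN (mySplit s) n)) = (mySplit s).drop n) ∧
    ((mySplit s).length ≤ n → bLoop s n 0 = none) := by
  intro n
  induction n with
  | zero =>
    intro s
    refine ⟨fun _ => ⟨rfl, by simp [offN], by simp [offN]⟩, fun hcon => ?_⟩
    cases e : mySplit s with
    | nil => exact absurd e (mySplit_ne_nil s)
    | cons a b => rw [e] at hcon; simp at hcon
  | succ n ih =>
    intro s
    obtain ⟨h, r, hsp, hcase⟩ := find_char_spec s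
    rcases hcase with ⟨hr0, hsh, hf⟩ | ⟨t, hrt, hst, hf⟩
    · subst hr0
      have hnone : bLoop s (n+1) 0 = none := by
        simp only [bLoop]
        rw [show ((0:Int) = ((0:Nat):Int)) from rfl, PySem.Chars.findFrom_natCast s ['\n'] 0 (by omega)]
        simp [hf]
      refine ⟨fun hlt => ?_, fun _ => hnone⟩
      rw [hsp] at hlt
      simp only [List.length_cons, List.length_nil] at hlt
      omega
    · subst hrt
      have hlen : h.length + 1 ≤ s.length := by rw [hst]; simp
      have hstep : bLoop s (n+1) 0 = (bLoop t n 0).map (fun x => x + ((h.length + 1 : Nat) : Int)) := by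
        simp only [bLoop]
        rw [PySem.Chars.findFrom_zero, hf, if_neg (by omega)]
        have e : (h.length : Int) + 1 = ((h.length + 1 : Nat) : Int) := by push_cast; ring
        rw [e, bLoop_shift n s (h.length + 1) hlen]
        have hd : List.drop (h.length + 1) s = t := by
          rw [hst, show h ++ '\n' :: t = (h ++ ['\n']) ++ t by simp,
            show h.length + 1 = (h ++ ['\n']).length by simp]
          exact List.drop_left
        rw [hd]
      have hoff : offN (mySplit s) (n+1) = (h.length + 1) + offN (mySplit t) n := by
        rw [hsp]; simp [offN]
      constructor
      · intro hlt
        rw [hsp] at hlt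
        simp only [List.length_cons] at hlt
        obtain ⟨hb, hle, hdrop⟩ := (ih t).1 (by omega)
        refine ⟨?_, ?_, ?_⟩
        · rw [hstep, hb, hoff]
          simp only [Option.map_some, Option.some.injEq]
          push_cast; ring
        · rw [hoff, hst]
          simp only [List.length_append, List.length_cons]
          omega
        · have hsp' := hsp
          rw [hst] at hsp'
          rw [hoff, hst]
          rw [show h ++ '\n' :: t = (h ++ ['\n']) ++ t by simp] at hsp' ⊢
          rw [show h.length + 1 + offN (mySplit t) n = (h ++ ['\n']).length + offN (mySplit t) n by simp]
          rw [← List.drop_drop, List.drop_left, hdrop, hsp']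
          simp
      · intro hge
        rw [hsp] at hge
        simp only [List.length_cons] at hge
        rw [hstep, (ih t).2 (by omega)]
        rfl

lemma sum_map_cast (L : List (List Char)) :
    (L.map (fun l => (l.length : Int) + 1)).sum = (((L.map (fun l => l.length + 1)).sum : Nat) : Int) := by
  induction L with
  | nil => simp
  | cons h t ih => simp [ih]

theorem main_eq (ln : Int) (s : String) :
    find_line_position_py ln s = find_line_position_py_alt ln s := by
  by_cases h1 : ln < 1
  · rw [find_line_position_py, find_line_position_py_alt, if_pos h1, if_neg (by omega)]
  · have hsplit : PySem.Chars.splitOn s.toList ['\n'] = mySplit s.toList := splitOn_eq _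
    set L := mySplit s.toList with hL
    set n := (ln - 1).toNat with hn
    have hln : ln - 1 = (n : Int) := by omega
    by_cases h2 : n < L.length
    · obtain ⟨hb, hle, hdrop⟩ := (bLoop_main n s.toList).1 h2
      set off := offN L n with hoffdef
      -- A side
      rw [find_line_position_py]
      simp only [hsplit]
      rw [if_pos ⟨by omega, by rw [hln]; exact_mod_cast h2⟩]
      rw [hln, PySem.List.pyGetD_natCast, PySem.List.slice_to_natCast]
      simp only [List.getD_eq_getElem _ _ h2, sum_map_cast]
      -- B side
      rw [find_line_position_py_alt, if_neg (by omega)]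
      rw [← hn, hb]
      simp only []
      -- structure of the remaining text
      obtain ⟨h', r', hu, hcase⟩ := find_char_spec (s.toList.drop off)
      have hLd : L.drop n = L[n] :: L.drop (n + 1) := List.drop_eq_getElem_cons h2
      rw [hdrop, ← hL, hLd] at hu
      injection hu with hh hr
      rw [PySem.Chars.findFrom_natCast s.toList ['\n'] off hle]
      rcases hcase with ⟨hr0, huh, hfneg⟩ | ⟨t, hrt', hut, hfpos⟩
      · rw [if_pos hfneg, if_pos rfl]
        rw [PySem.List.slice_natCast]
        have hulen : s.toList.length - off = h'.length := by rw [← huh]; simp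
        rw [hulen, huh, List.take_length]
        have hsum : ((L.take n).map (fun l => l.length + 1)).sum = off := rfl
        have hcast : ((s.toList.length : Nat) : Int) = (off : Int) + (h'.length : Int) := by
          omega
        rw [hh, hsum, hcast]
      · have h0 : (0:Int) ≤ PySem.Chars.find (s.toList.drop off) ['\n'] := by rw [hfpos]; positivity
        rw [if_neg (by omega), if_neg (by omega)]
        rw [hfpos, show (off : Int) + (h'.length : Int) = ((off + h'.length : Nat) : Int) by push_cast; ring]
        rw [PySem.List.slice_natCast]
        have : (s.toList.drop off).take (off + h'.length - off) = h' := by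
          rw [show off + h'.length - off = h'.length by omega, hut]
          exact List.take_left
        rw [this, hh]
        have hsum : ((L.take n).map (fun l => l.length + 1)).sum = off := rfl
        rw [hsum]
        push_cast
        rfl
    · have hbn : bLoop s.toList n 0 = none := (bLoop_main n s.toList).2 (by rw [← hL]; omega)
      rw [find_line_position_py, find_line_position_py_alt, if_neg h1]
      simp only [hsplit]
      rw [if_neg (by rw [hln]; exact fun ⟨_, hc⟩ => h2 (by exact_mod_cast hc))]
      rw [← hn, hbn]

-- ===== VERDICT (by name: the statement is the Claim_ definition above) =====
theorem find_line_position_py_spec : Claim_equal_find_line_position_py := by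
  intro line_number document_text _
  exact main_eq line_number document_text
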